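-- pv_equiv track=rewrite | github.com/rccmodena/kattis_problems | problems/t/thisaintyourgrandpascheckerboard/thisaintyourgrandpascheckerboard.py | is_line_correct
-- ===== SOURCE A (Python) =====
-- def is_line_correct(line):
--     n_white = 0
--     n_black = 0
--     sequence = {"type": "W", "count": 0}
--     for square in line:
--         if square == "W":
--             n_white += 1
--
--         if square == "B":
--             n_black += 1
--
--         if square == sequence["type"]:
--             if sequence["count"] == 2:
--                 return False
--             else:
--                 sequence["count"] += 1
--         else:
--             sequence["type"] = square
--             sequence["count"] = 1
--
--     if n_white == n_black:
--         return True
--     else: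
--         return False
-- ===== SOURCE B (Python) =====
-- def is_line_correct(line):
--     if line.count("W") != line.count("B"):
--         return False
--     return not any(a == b == c for a, b, c in zip(line, line[1:], line[2:]))
-- ===== Notes on version B (the rewrite author's own statement) =====
-- stated objective: simpler
-- what changed: Replaces the fused single loop with running counters and a mutable run-tracking dict by two independent concerns: a library count-equality check and a zip-based sliding-triple scan.
import Mathlib
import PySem

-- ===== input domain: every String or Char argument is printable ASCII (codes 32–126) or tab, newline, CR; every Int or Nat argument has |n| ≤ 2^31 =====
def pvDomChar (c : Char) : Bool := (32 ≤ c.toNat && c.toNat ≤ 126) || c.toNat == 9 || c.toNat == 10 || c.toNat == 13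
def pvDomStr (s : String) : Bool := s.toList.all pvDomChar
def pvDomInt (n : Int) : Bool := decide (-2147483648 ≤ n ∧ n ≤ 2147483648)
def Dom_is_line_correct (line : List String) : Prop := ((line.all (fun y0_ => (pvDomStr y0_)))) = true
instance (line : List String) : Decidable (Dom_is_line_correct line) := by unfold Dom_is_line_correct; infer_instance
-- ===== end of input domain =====

-- B replaces A's fused loop (counters + mutable run dict) with a count-equality check plus a zip-based sliding-triple scan; objective: simpler.

-- ===== PORT A =====
-- the for-loop of A, with state (n_white, n_black, sequence["type"], sequence["count"]); early 'return False' stops the recursion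
def is_line_correct_loop (rest : List String) (nw nb : Int) (t : String) (c : Int) : Bool :=
  match rest with
  | [] => if nw == nb then true else false
  | square :: rest =>
    let nw := if square == "W" then nw + 1 else nw
    let nb := if square == "B" then nb + 1 else nb
    if square == t then
      if c == 2 then false
      else is_line_correct_loop rest nw nb t (c + 1)
    else is_line_correct_loop rest nw nb square 1

def is_line_correct (line : List String) : Bool :=
  is_line_correct_loop line 0 0 "W" 0

-- ===== PORT B =====
def is_line_correct_alt (line : List String) : Bool :=
  if PySem.List.count line "W" ≠ PySem.List.count line "B" then false
  else !((line.zip ((PySem.List.slice line (some 1) none).zip (PySem.List.slice line (some 2) none))).any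
          (fun p => p.1 == p.2.1 && p.2.1 == p.2.2))

-- ===== PRECONDITION & SPEC =====
def Spec_is_line_correct (line : List String) (out : Bool) : Prop := out = is_line_correct_alt line
instance (line : List String) (out : Bool) : Decidable (Spec_is_line_correct line out) := by unfold Spec_is_line_correct; infer_instance

-- ===== CLAIM (what is proved, stated in full; the proofs are below) =====
def Claim_equal_is_line_correct : Prop := ∀ (line : List String), Dom_is_line_correct line → Spec_is_line_correct line (is_line_correct line)

-- ===== LEMMAS AND PROOFS =====

-- spec-level: the run-detection part of A's loop alone, same state machine
def noTripFrom (t : String) (c : Int) : List String → Bool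
  | [] => true
  | s :: rest =>
    if s == t then (if c == 2 then false else noTripFrom t (c + 1) rest)
    else noTripFrom s 1 rest

-- B's triple scan as written in the port, named for the proofs
def tripAny (line : List String) : Bool :=
  (line.zip ((line.drop 1).zip (line.drop 2))).any (fun p => p.1 == p.2.1 && p.2.1 == p.2.2)

lemma tripAny_cons3 (a b c : String) (r : List String) :
    tripAny (a :: b :: c :: r) = ((a == b && b == c) || tripAny (b :: c :: r)) := by
  simp [tripAny]

-- A's loop splits into the run check and the final count comparison
lemma loop_split (line : List String) : ∀ (nw nb : Int) (t : String) (c : Int),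
    is_line_correct_loop line nw nb t c =
      (noTripFrom t c line &&
        decide (nw + (line.count "W" : Int) = nb + (line.count "B" : Int))) := by
  induction line with
  | nil =>
    intro nw nb t c
    simp only [is_line_correct_loop, noTripFrom, List.count_nil, Int.natCast_zero, add_zero,
      Bool.true_and]
    by_cases h : nw = nb
    · simp [h]
    · simp [h, beq_iff_eq]
  | cons s rest ih =>
    intro nw nb t c
    simp only [is_line_correct_loop, noTripFrom]
    by_cases hst : s == t
    · simp only [hst, ite_true]
      by_cases hc : c == 2
      · simp [hc]
      · simp only [hc, ih, Bool.false_eq_true, if_false]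
        congr 1
        simp only [decide_eq_decide]
        by_cases h1 : s = "W" <;> by_cases h2 : s = "B" <;>
          simp [h1, h2] <;> omega
    · simp only [hst, Bool.false_eq_true, if_false, ih]
      congr 1
      simp only [decide_eq_decide]
      by_cases h1 : s = "W" <;> by_cases h2 : s = "B" <;>
        simp [h1, h2] <;> omega

-- a ≠ b read off backwards as a Bool equation
lemma beq_false_symm {a b : String} (h : ¬ (a == b) = true) : (b == a) = false := by
  simp [beq_iff_eq] at h ⊢
  exact fun e => h e.symm

-- joint characterisation of the run states 1 and 2 by the triple scan
lemma noTripFrom_states : ∀ (n : Nat) (l : List String), l.length ≤ n → ∀ (t : String),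
    (noTripFrom t 1 l = !tripAny (t :: l)) ∧ (noTripFrom t 2 l = !tripAny (t :: t :: l)) := by
  intro n
  induction n with
  | zero =>
    intro l hl t
    have : l = [] := by cases l <;> simp_all
    subst this
    exact ⟨rfl, rfl⟩
  | succ n ih =>
    intro l hl t
    cases l with
    | nil => exact ⟨rfl, rfl⟩
    | cons u r =>
      have hr : r.length ≤ n := by simp at hl; omega
      constructor
      · -- state 1
        by_cases hut : u == t
        · have ht : u = t := by simpa [beq_iff_eq] using hut
          subst ht
          have h2 := (ih r hr u).2
          simpa [noTripFrom] using h2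
        · have h1 := (ih r hr u).1
          simp only [noTripFrom, hut, Bool.false_eq_true, if_false, h1]
          cases r with
          | nil => simp [tripAny]
          | cons v r' =>
            rw [tripAny_cons3]
            simp [beq_false_symm hut]
      · -- state 2
        by_cases hut : u == t
        · have ht : u = t := by simpa [beq_iff_eq] using hut
          subst ht
          simp only [noTripFrom, beq_self_eq_true, ite_true]
          rw [tripAny_cons3]
          simp
        · have h1 := (ih r hr u).1
          simp only [noTripFrom, hut, Bool.false_eq_true, if_false, h1]
          cases r with
          | nil => simp [tripAny, beq_false_symm hut]
          | cons v r' =>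
            rw [tripAny_cons3 t t u, tripAny_cons3 t u v]
            simp [beq_false_symm hut]

lemma noTripFrom_start (line : List String) : noTripFrom "W" 0 line = !tripAny line := by
  cases line with
  | nil => rfl
  | cons s rest =>
    have h1 := (noTripFrom_states rest.length rest le_rfl s).1
    by_cases hs : s == "W"
    · have : s = "W" := by simpa [beq_iff_eq] using hs
      subst this
      simpa [noTripFrom] using h1
    · simpa [noTripFrom, hs] using h1

-- ===== VERDICT (by name: the statement is the Claim_ definition above) =====
theorem is_line_correct_spec : Claim_equal_is_line_correct := by
  intro line _
  unfold Spec_is_line_correct is_line_correct is_line_correct_alt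
  rw [loop_split, noTripFrom_start]
  have hsl1 : PySem.List.slice line (some 1) none = line.drop 1 := by
    rw [PySem.List.slice_from_one line, List.drop_one]
  have hsl2 : PySem.List.slice line (some 2) none = line.drop 2 := by
    simpa using PySem.List.slice_from (xs := line) (a := 2) (by norm_num)
  rw [hsl1, hsl2, PySem.List.count_eq, PySem.List.count_eq]
  by_cases hc : List.count "W" line = List.count "B" line
  · simp [hc, tripAny]
  · have h2 : ¬ ((0 : Int) + (line.count "W" : Int) = 0 + (line.count "B" : Int)) := by
      simpa using fun e => hc (by exact_mod_cast e)
    simp [hc]
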